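-- pv_equiv track=rewrite | github.com/boyuanzheng010/multi_coref | utils/data_util.py | gather_by_annotator
-- ===== SOURCE A (Python) =====
-- def gather_by_annotator(annotations):
--     """
--     annotations: [sentence along with all annotation]
--     return {username: [annotations]}
--     """
--     output = {}
--     for instance in annotations:
--         key_id = instance['Turkle.Username']
--         if key_id not in output:
--             output[key_id] = [instance]
--         else:
--             output[key_id].append(instance)
--     return output
-- ===== SOURCE B (Python) =====
-- def gather_by_annotator(annotations):
--     """
--     annotations: [sentence along with all annotation]
--     return {username: [annotations]}
--     """
--     keys = list(dict.fromkeys(inst['Turkle.Username'] for inst in annotations))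
--     return {u: [inst for inst in annotations if inst['Turkle.Username'] == u]
--             for u in keys}
-- ===== Notes on version B (the rewrite author's own statement) =====
-- stated objective: alternative
-- what changed: Replaces the per-element bucket-dispatch into a mutable dict by a two-pass decomposition: first dedup the usernames in order of first occurrence, then build each group with a filtering comprehension over the whole input.
import Mathlib
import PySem

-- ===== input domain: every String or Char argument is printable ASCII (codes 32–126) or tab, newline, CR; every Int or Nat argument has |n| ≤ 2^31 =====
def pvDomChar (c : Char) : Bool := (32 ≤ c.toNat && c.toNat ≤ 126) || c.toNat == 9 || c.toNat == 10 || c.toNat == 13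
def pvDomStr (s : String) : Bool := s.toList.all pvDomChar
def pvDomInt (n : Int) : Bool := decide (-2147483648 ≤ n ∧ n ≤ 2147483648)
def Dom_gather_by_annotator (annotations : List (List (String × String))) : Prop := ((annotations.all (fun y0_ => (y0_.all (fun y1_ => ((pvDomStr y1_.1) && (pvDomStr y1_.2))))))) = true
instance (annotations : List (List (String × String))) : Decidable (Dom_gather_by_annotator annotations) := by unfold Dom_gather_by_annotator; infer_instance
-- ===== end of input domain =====

-- B replaces A's per-element bucket-dispatch into a mutable dict by a two-pass decomposition
-- (ordered dedup of the usernames, then one filtering pass per username); alternative, not faster.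


-- instance['Turkle.Username'] — first-match lookup in the instance dict (association list);
-- the '.getD ""' default is never reached under Pre_ (Python raises KeyError there).
def pvUser (inst : List (String × String)) : String :=
  ((PySem.Dict.mk inst).get? "Turkle.Username").getD ""

-- ===== PORT A =====
def gather_by_annotator (annotations : List (List (String × String))) : List (String × List (List (String × String))) :=
  (annotations.foldl
    (fun (output : PySem.Dict String (List (List (String × String)))) inst =>
      let key_id := pvUser inst
      if output.contains key_id = false then output.insert key_id [inst]
      else output.modify key_id [] (fun l => l ++ [inst]))
    PySem.Dict.empty).items

-- ===== PORT B =====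
def gather_by_annotator_alt (annotations : List (List (String × String))) : List (String × List (List (String × String))) :=
  let keys := PySem.List.dedup (annotations.map pvUser)
  keys.map (fun u => (u, annotations.filter (fun inst => pvUser inst == u)))

-- ===== PRECONDITION & SPEC =====
-- Pre_ excludes exactly the instances without a 'Turkle.Username' key, on which Python A raises KeyError.
def Pre_gather_by_annotator (annotations : List (List (String × String))) : Prop :=
  (annotations.all (fun inst => ((PySem.Dict.mk inst).get? "Turkle.Username").isSome)) = true
instance (annotations : List (List (String × String))) : Decidable (Pre_gather_by_annotator annotations) := by unfold Pre_gather_by_annotator; infer_instance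
def pvWitness_gather_by_annotator : (List (List (String × String))) :=
  [[("Turkle.Username", "alice"), ("text", "hi")], [("Turkle.Username", "bob")]]
def Spec_gather_by_annotator (annotations : List (List (String × String))) (out : List (String × List (List (String × String)))) : Prop := out = gather_by_annotator_alt annotations
instance (annotations : List (List (String × String))) (out : List (String × List (List (String × String)))) : Decidable (Spec_gather_by_annotator annotations out) := by unfold Spec_gather_by_annotator; infer_instance

-- ===== CLAIM (what is proved, stated in full; the proofs are below) =====
def Claim_equal_gather_by_annotator : Prop := ∀ (annotations : List (List (String × String))), Dom_gather_by_annotator annotations → Pre_gather_by_annotator annotations → Spec_gather_by_annotator annotations (gather_by_annotator annotations)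

-- ===== LEMMAS AND PROOFS =====

-- A's two branches are both 'output[key] = output.get(key, []) + [inst]'.
theorem pv_step_eq (d : PySem.Dict String (List (List (String × String))))
    (k : String) (i : List (String × String)) :
    (if d.contains k = false then d.insert k [i] else d.modify k [] (fun l => l ++ [i]))
      = d.modify k [] (fun l => l ++ [i]) := by
  by_cases h : d.contains k = false
  · simp only [h, if_true]
    simp [PySem.Dict.modify, PySem.Dict.insert, h, PySem.Dict.getD_of_not_contains]
  · simp [h]

theorem pv_dict_eq (annotations : List (List (String × String))) :
    annotations.foldl
      (fun (output : PySem.Dict String (List (List (String × String)))) inst =>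
        let key_id := pvUser inst
        if output.contains key_id = false then output.insert key_id [inst]
        else output.modify key_id [] (fun l => l ++ [inst]))
      PySem.Dict.empty
    = (annotations.map (fun inst => (pvUser inst, inst))).foldl
        (fun d p => d.modify p.1 [] (fun l => l ++ [p.2])) PySem.Dict.empty := by
  rw [List.foldl_map]
  apply PySem.List.foldl_congr_mem
  intro acc x _
  exact pv_step_eq acc (pvUser x) x

theorem gather_by_annotator_spec : Claim_equal_gather_by_annotator := by
  intro annotations _ _
  unfold Spec_gather_by_annotator gather_by_annotator gather_by_annotator_alt
  rw [pv_dict_eq]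
  set l := annotations.map (fun inst => (pvUser inst, inst)) with hl
  have hnd : ((l.foldl (fun d p => d.modify p.1 [] (fun l => l ++ [p.2]))
      PySem.Dict.empty).keys).Nodup := by
    exact PySem.Dict.nodup_keys_foldl_modify_key l Prod.fst [] (fun _ p => (· ++ [p.2]))
      PySem.Dict.empty (by simp [PySem.Dict.keys_empty])
  rw [PySem.Dict.items_eq_map_keys _ hnd []]
  have hkeys : (l.foldl (fun d p => d.modify p.1 [] (fun l => l ++ [p.2]))
      PySem.Dict.empty).keys = PySem.List.dedup (annotations.map pvUser) := by
    rw [PySem.Dict.keys_foldl_modify_key (key := Prod.fst) (f := fun _ p => (· ++ [p.2]))]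
    simp [hl, PySem.Dict.keys_empty, PySem.List.dedup_eq_ofList, List.map_map]
    rfl
  rw [hkeys]
  refine List.map_congr_left (fun u _ => ?_)
  rw [PySem.Dict.getD_foldl_modify_append]
  simp [hl, PySem.Dict.getD_empty, List.filter_map, Function.comp_def, List.map_map]

-- ===== VERDICT (by name: the statement is the Claim_ definition above) =====
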